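-- pv_equiv track=rewrite | github.com/antoniofalcescu/advent-of-code-2023 | day-14-parabolic-reflector-dish/main.py | roll_stones
-- ===== SOURCE A (Python) =====
-- def roll_stones(grid):
--     for row in grid:
--         for j in range(1, len(row)):
--             if row[j] == 'O':
--                 k = j - 1
--                 j_aux = j
--                 while k >= 0 and row[k] == '.':
--                     row[j_aux] = '.'
--                     row[k] = 'O'
--                     k -= 1
--                     j_aux -= 1
--
--     return grid
-- ===== SOURCE B (Python) =====
-- def _roll_row(row):
--     new_row = []
--     stones = 0
--     dots = 0
--     for cell in row:
--         if cell == 'O':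
--             stones += 1
--         elif cell == '.':
--             dots += 1
--         else:
--             new_row.extend(['O'] * stones)
--             new_row.extend(['.'] * dots)
--             new_row.append(cell)
--             stones = 0
--             dots = 0
--     new_row.extend(['O'] * stones)
--     new_row.extend(['.'] * dots)
--     return new_row
--
--
-- def roll_stones(grid):
--     return [_roll_row(row) for row in grid]
-- ===== Notes on version B (the rewrite author's own statement) =====
-- stated objective: alternative
-- what changed: Replaces A's per-stone leftward bubbling (a while loop nested under the index scan, mutating the row in place) with a single counting pass per row that tallies stones and dots of the current segment and flushes 'O'*stones + '.'*dots at each blocker, building a fresh grid.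
import Mathlib
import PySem

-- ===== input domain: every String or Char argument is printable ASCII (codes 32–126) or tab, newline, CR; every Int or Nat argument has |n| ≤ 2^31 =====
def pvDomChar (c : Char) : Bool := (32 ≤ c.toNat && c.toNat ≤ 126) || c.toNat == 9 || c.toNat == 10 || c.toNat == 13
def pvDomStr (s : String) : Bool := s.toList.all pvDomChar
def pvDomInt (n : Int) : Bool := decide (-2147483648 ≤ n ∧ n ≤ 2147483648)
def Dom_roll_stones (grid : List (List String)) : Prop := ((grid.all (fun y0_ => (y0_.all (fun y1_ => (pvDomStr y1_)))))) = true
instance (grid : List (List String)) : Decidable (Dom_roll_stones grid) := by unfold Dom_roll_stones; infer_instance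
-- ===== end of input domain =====

-- B replaces A's per-stone leftward bubbling (a while loop under the index scan) with one counting pass per row
-- that flushes each segment as stones-then-dots; A mutates its argument rows in place and returns the same grid
-- object, B builds a fresh grid — the equivalence proved here is about the RETURN value only.

-- ===== PORT A =====
-- the inner 'while k >= 0 and row[k] == ".": row[j_aux] = "."; row[k] = "O"; k -= 1; j_aux -= 1' loop;
-- the guard ensures 0 ≤ k (and jaux = k + 1 > 0 throughout), so List.set on .toNat is Python's in-range assignment
def rollWhileA (row : List String) (k jaux : Int) : List String :=
  if h : 0 ≤ k ∧ PySem.List.pyGet? row k = some "." then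
    rollWhileA ((row.set jaux.toNat ".").set k.toNat "O") (k - 1) (jaux - 1)
  else row
termination_by (k + 1).toNat
decreasing_by omega

-- 'for j in range(1, len(row)): if row[j] == "O": …'  (len(row) is unchanged by the mutations)
def rollRowA (row : List String) : List String :=
  (PySem.List.pyRange 1 (row.length : Int) 1).foldl
    (fun r j => if PySem.List.pyGet? r j = some "O" then rollWhileA r (j - 1) j else r) row

-- 'for row in grid' mutates each row independently; the returned grid is the list of transformed rows
def roll_stones (grid : List (List String)) : List (List String) :=
  grid.map rollRowA

-- ===== PORT B =====
-- state = (new_row, stones, dots) of Source B's row loop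
def browStep (st : List String × Nat × Nat) (c : String) : List String × Nat × Nat :=
  if c = "O" then (st.1, st.2.1 + 1, st.2.2)
  else if c = "." then (st.1, st.2.1, st.2.2 + 1)
  else (st.1 ++ List.replicate st.2.1 "O" ++ List.replicate st.2.2 "." ++ [c], 0, 0)

def rollRowB (row : List String) : List String :=
  let st := row.foldl browStep ([], 0, 0)
  st.1 ++ List.replicate st.2.1 "O" ++ List.replicate st.2.2 "."

def roll_stones_alt (grid : List (List String)) : List (List String) :=
  grid.map rollRowB

-- ===== PRECONDITION & SPEC =====
def Spec_roll_stones (grid : List (List String)) (out : List (List String)) : Prop := out = roll_stones_alt grid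
instance (grid : List (List String)) (out : List (List String)) : Decidable (Spec_roll_stones grid out) := by unfold Spec_roll_stones; infer_instance

-- ===== CLAIM (what is proved, stated in full; the proofs are below) =====
def Claim_equal_roll_stones : Prop := ∀ (grid : List (List String)), Dom_roll_stones grid → Spec_roll_stones grid (roll_stones grid)

-- ===== LEMMAS AND PROOFS =====

-- invariant of B's accumulator: new_row never ends with "." (flushes end with the blocker)
def BInv (st : List String × Nat × Nat) : Prop :=
  st.1 = [] ∨ ∃ c, st.1.getLast? = some c ∧ c ≠ "."

lemma binv_foldl (p : List String) : ∀ st, BInv st → BInv (p.foldl browStep st) := by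
  induction p with
  | nil => intro st h; exact h
  | cons c t ih =>
    intro st h
    simp only [List.foldl_cons]
    apply ih
    unfold browStep BInv
    split_ifs with h1 h2
    · exact h
    · exact h
    · right; exact ⟨c, by simp, h2⟩

lemma blen_foldl (p : List String) : ∀ st : List String × Nat × Nat,
    (p.foldl browStep st).1.length + (p.foldl browStep st).2.1 + (p.foldl browStep st).2.2
      = st.1.length + st.2.1 + st.2.2 + p.length := by
  induction p with
  | nil => intro st; simp
  | cons c t ih =>
    intro st
    simp only [List.foldl_cons]
    rw [ih]
    unfold browStep
    split_ifs <;> simp <;> omega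

lemma rollRowB_length (p : List String) : (rollRowB p).length = p.length := by
  unfold rollRowB
  have := blen_foldl p ([], 0, 0)
  simp at this ⊢
  omega

lemma rollRowB_append_not_O (p : List String) (c : String) (h : c ≠ "O") :
    rollRowB (p ++ [c]) = rollRowB p ++ [c] := by
  unfold rollRowB
  rw [List.foldl_append]
  set st := p.foldl browStep ([], 0, 0) with hst
  simp only [List.foldl_cons, List.foldl_nil]
  unfold browStep
  rw [if_neg h]
  by_cases hd : c = "."
  · subst hd
    simp [List.replicate_succ']
  · rw [if_neg hd]
    simp

lemma rollRowB_append_O (p : List String) :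
    rollRowB (p ++ ["O"])
      = (p.foldl browStep ([], 0, 0)).1
        ++ List.replicate (p.foldl browStep ([], 0, 0)).2.1 "O"
        ++ ("O" :: List.replicate (p.foldl browStep ([], 0, 0)).2.2 ".") := by
  unfold rollRowB
  rw [List.foldl_append]
  simp only [List.foldl_cons, List.foldl_nil]
  unfold browStep
  rw [if_pos rfl]
  simp [List.replicate_succ']

lemma pv_set_at_append {α : Type} (l t : List α) (i : Nat) (y : α) :
    (l ++ t).set (l.length + i) y = l ++ t.set i y := by
  rw [List.set_append, if_neg (by omega)]
  simp

lemma rollRowB_single (c : String) : rollRowB [c] = [c] := by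
  simp only [rollRowB, List.foldl_cons, List.foldl_nil, browStep]
  split_ifs with h1 h2 <;> simp_all

-- the while loop bubbles the stone over exactly the trailing dots of the settled prefix
lemma rollWhileA_bubble (d : Nat) : ∀ (q rest : List String),
    (q = [] ∨ ∃ c, q.getLast? = some c ∧ c ≠ ".") →
    rollWhileA (q ++ List.replicate d "." ++ "O" :: rest) ((q.length : Int) + d - 1) ((q.length : Int) + d)
      = q ++ "O" :: (List.replicate d "." ++ rest) := by
  induction d with
  | zero =>
    intro q rest hq
    rw [rollWhileA]
    rw [dif_neg]
    · simp
    · rcases hq with h | ⟨c, hc, hne⟩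
      · subst h; simp
      · intro ⟨hk, hget⟩
        have hq0 : 0 < q.length := by
          cases q with
          | nil => simp at hc
          | cons a t => simp
        have hidx : (q.length : Int) + ((0 : Nat) : Int) - 1 = ((q.length - 1 : Nat) : Int) := by
          omega
        simp only [List.replicate_zero, List.append_nil] at hget
        rw [hidx, PySem.List.pyGet?_natCast] at hget
        rw [List.getElem?_append_left (by omega)] at hget
        rw [← List.getLast?_eq_getElem?] at hget
        rw [hc] at hget
        simp at hget
        exact hne hget
  | succ d ih =>
    intro q rest hq
    rw [rollWhileA]
    rw [dif_pos]
    · -- compute the two set operations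
      have hrow : q ++ List.replicate (d + 1) "." ++ "O" :: rest
          = (q ++ List.replicate d ".") ++ ("." :: "O" :: rest) := by
        rw [List.replicate_succ']; simp
      have hk : ((q.length : Int) + ((d + 1 : Nat) : Int) - 1).toNat = q.length + d := by omega
      have hj : ((q.length : Int) + ((d + 1 : Nat) : Int)).toNat = q.length + d + 1 := by omega
      have hlen : (q ++ List.replicate d ".").length = q.length + d := by simp
      have hset : ((q ++ List.replicate (d + 1) "." ++ "O" :: rest).set
            ((q.length : Int) + ((d + 1 : Nat) : Int)).toNat ".").set
            ((q.length : Int) + ((d + 1 : Nat) : Int) - 1).toNat "O"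
          = q ++ List.replicate d "." ++ "O" :: ("." :: rest) := by
        rw [hk, hj, hrow]
        rw [show q.length + d + 1 = (q ++ List.replicate d ".").length + 1 from by simp]
        rw [pv_set_at_append]
        rw [show ("." :: "O" :: rest).set 1 "." = "." :: "." :: rest from rfl]
        rw [show q.length + d = (q ++ List.replicate d ".").length + 0 from by simp]
        rw [pv_set_at_append]
        simp
      rw [hset]
      have harg1 : (q.length : Int) + ((d + 1 : Nat) : Int) - 1 - 1 = (q.length : Int) + (d : Int) - 1 := by
        push_cast; ring
      have harg2 : (q.length : Int) + ((d + 1 : Nat) : Int) - 1 = (q.length : Int) + (d : Int) := by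
        push_cast; ring
      rw [harg1, harg2]
      rw [ih q ("." :: rest) hq]
      rw [List.replicate_succ']
      simp
    · constructor
      · omega
      · have hk' : (q.length : Int) + ((d + 1 : Nat) : Int) - 1 = ((q.length + d : Nat) : Int) := by
          push_cast; ring
        rw [hk', PySem.List.pyGet?_natCast]
        rw [List.getElem?_append_left (by simp)]
        rw [List.getElem?_append_right (by omega)]
        simp

lemma rowInv (o : List String) : ∀ m : Nat, 1 ≤ m → m ≤ o.length →
    (PySem.List.pyRange 1 (m : Int) 1).foldl
      (fun r j => if PySem.List.pyGet? r j = some "O" then rollWhileA r (j - 1) j else r) o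
      = rollRowB (o.take m) ++ o.drop m := by
  intro m
  induction m with
  | zero => omega
  | succ m ih =>
    intro _ hle
    by_cases hm : m = 0
    · subst hm
      rw [PySem.List.pyRange_one_eq_nil (by norm_num)]
      simp only [List.foldl_nil]
      cases o with
      | nil => simp at hle
      | cons a t => simp [rollRowB_single]
    · have h1m : 1 ≤ m := by omega
      have hmlt : m < o.length := by omega
      rw [show ((m + 1 : Nat) : Int) = (m : Int) + 1 by push_cast; ring]
      rw [PySem.List.pyRange_one_succ_right (by omega)]
      rw [List.foldl_append]
      rw [ih h1m (by omega)]
      simp only [List.foldl_cons, List.foldl_nil]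
      set p := o.take m with hp
      have hplen : p.length = m := by simp [hp]; omega
      have hdrop : o.drop m = o[m] :: o.drop (m + 1) := List.drop_eq_getElem_cons hmlt
      set c := o[m] with hc
      have hblen : (rollRowB p).length = m := by rw [rollRowB_length, hplen]
      have hget : PySem.List.pyGet? (rollRowB p ++ o.drop m) (m : Int) = some c := by
        rw [PySem.List.pyGet?_natCast, List.getElem?_append_right (by omega), hblen]
        simp [hdrop]
      have htake : o.take (m + 1) = p ++ [c] := by
        rw [List.take_add_one]
        congr 1
        simp [hc, List.getElem?_eq_getElem hmlt]
      by_cases hO : c = "O"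
      · rw [hget, if_pos (by rw [hO])]
        set st := p.foldl browStep ([], 0, 0) with hst
        have hflush : rollRowB p = (st.1 ++ List.replicate st.2.1 "O") ++ List.replicate st.2.2 "." := by
          rw [hst]; rfl
        have hqlen : (st.1 ++ List.replicate st.2.1 "O").length + st.2.2 = m := by
          have h2 := blen_foldl p ([], 0, 0)
          rw [← hst] at h2
          simp only [List.length_nil, Nat.zero_add, Nat.add_zero] at h2
          simp only [List.length_append, List.length_replicate]
          omega
        have hqinv : (st.1 ++ List.replicate st.2.1 "O") = []
            ∨ ∃ x, (st.1 ++ List.replicate st.2.1 "O").getLast? = some x ∧ x ≠ "." := by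
          rcases Nat.eq_zero_or_pos st.2.1 with hs | hs
          · have hnil : List.replicate st.2.1 "O" = ([] : List String) := by simp [hs]
            rw [hnil, List.append_nil]
            have := binv_foldl p ([], 0, 0) (by left; rfl)
            rw [← hst] at this
            exact this
          · right
            refine ⟨"O", ?_, by decide⟩
            obtain ⟨s', hs'⟩ : ∃ s', st.2.1 = s' + 1 := ⟨st.2.1 - 1, by omega⟩
            rw [hs', List.replicate_succ', ← List.append_assoc, List.getLast?_concat]
        have hrow : rollRowB p ++ o.drop m
            = (st.1 ++ List.replicate st.2.1 "O") ++ List.replicate st.2.2 "." ++ "O" :: o.drop (m + 1) := by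
          rw [hflush, hdrop, ← hO]
        rw [hrow]
        have hidx1 : (m : Int) - 1 = (((st.1 ++ List.replicate st.2.1 "O").length : Nat) : Int) + st.2.2 - 1 := by
          omega
        have hidx2 : (m : Int) = (((st.1 ++ List.replicate st.2.1 "O").length : Nat) : Int) + st.2.2 := by
          omega
        rw [hidx1, hidx2]
        rw [rollWhileA_bubble st.2.2 _ _ hqinv]
        rw [htake, hO, rollRowB_append_O, ← hst]
        simp
      · rw [hget, if_neg (by simp [hO])]
        rw [htake, rollRowB_append_not_O p c hO, hdrop]
        simp

lemma rowA_eq_rowB (o : List String) : rollRowA o = rollRowB o := by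
  unfold rollRowA
  cases o with
  | nil =>
    rw [show ((List.length ([] : List String) : Nat) : Int) = 0 by simp]
    rw [PySem.List.pyRange_one_eq_nil (by omega)]
    simp [rollRowB]
  | cons a t =>
    rw [rowInv (a :: t) (a :: t).length (by simp) (le_refl _)]
    simp

-- ===== VERDICT (by name: the statement is the Claim_ definition above) =====
theorem roll_stones_spec : Claim_equal_roll_stones := by
  intro grid _
  unfold Spec_roll_stones roll_stones roll_stones_alt
  induction grid with
  | nil => rfl
  | cons r t _ => simp [rowA_eq_rowB]
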